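-- pv_equiv track=rewrite | github.com/lsylsy0516/LLM_test | utils/get_txt.py | compare_list_of_lists_unordered
-- ===== SOURCE A (Python) =====
-- def compare_list_of_lists_unordered(list1, list2):
--     # 首先比较长度
--     if len(list1) != len(list2):
--         return False
--
--     # 对每个子列表进行排序
--     sorted_list1 = [sorted(sublist) for sublist in list1]
--     sorted_list2 = [sorted(sublist) for sublist in list2]
--
--     # 对整个列表进行排序
--     sorted_list1.sort()
--     sorted_list2.sort()
--
--     # 比较排序后的列表
--     return sorted_list1 == sorted_list2
-- ===== SOURCE B (Python) =====
-- def compare_list_of_lists_unordered(list1, list2):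
--     if len(list1) != len(list2):
--         return False
--     remaining = [sorted(s) for s in list2]
--     for sub in list1:
--         key = sorted(sub)
--         if key in remaining:
--             remaining.remove(key)
--         else:
--             return False
--     return not remaining
-- ===== Notes on version B (the rewrite author's own statement) =====
-- stated objective: alternative
-- what changed: Instead of sorting both outer lists and comparing them, B canonicalizes list2 once and runs a membership-and-removal matching loop over list1, returning False on the first unmatched sublist.
import Mathlib
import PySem

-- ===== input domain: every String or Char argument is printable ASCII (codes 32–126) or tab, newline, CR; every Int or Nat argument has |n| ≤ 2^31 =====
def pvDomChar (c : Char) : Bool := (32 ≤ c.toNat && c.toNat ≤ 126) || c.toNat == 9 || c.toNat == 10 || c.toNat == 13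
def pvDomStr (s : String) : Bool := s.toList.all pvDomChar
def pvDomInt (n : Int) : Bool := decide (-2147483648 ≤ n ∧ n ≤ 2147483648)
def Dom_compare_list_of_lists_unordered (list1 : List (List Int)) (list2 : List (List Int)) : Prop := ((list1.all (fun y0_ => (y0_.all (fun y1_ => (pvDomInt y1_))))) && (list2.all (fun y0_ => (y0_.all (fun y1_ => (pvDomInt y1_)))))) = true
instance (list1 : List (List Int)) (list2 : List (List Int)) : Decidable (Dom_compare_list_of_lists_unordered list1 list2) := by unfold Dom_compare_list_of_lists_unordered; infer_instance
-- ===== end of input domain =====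

-- B replaces A's sort-both-outer-lists-and-compare with a membership-and-removal
-- matching loop over a canonicalized copy of list2 (alternative decomposition, same results).

-- ===== PORT A =====
def compare_list_of_lists_unordered (list1 : List (List Int)) (list2 : List (List Int)) : Bool :=
  if list1.length ≠ list2.length then false
  else
    let sorted_list1 := list1.map (fun sublist => PySem.List.sorted sublist (fun x => x) false)
    let sorted_list2 := list2.map (fun sublist => PySem.List.sorted sublist (fun x => x) false)
    let sorted_list1' := PySem.List.sorted sorted_list1 (fun x => x) false
    let sorted_list2' := PySem.List.sorted sorted_list2 (fun x => x) false
    sorted_list1' == sorted_list2'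

-- ===== PORT B =====
-- the 'for sub in list1' matching loop of Source B ('key in remaining' + '.remove' = PySem.List.remove?)
def pvMatchLoop (l1 : List (List Int)) (remaining : List (List Int)) : Bool :=
  match l1 with
  | [] => remaining.isEmpty
  | sub :: rest =>
    match PySem.List.remove? remaining (PySem.List.sorted sub (fun x => x) false) with
    | some r => pvMatchLoop rest r
    | none => false

def compare_list_of_lists_unordered_alt (list1 : List (List Int)) (list2 : List (List Int)) : Bool :=
  if list1.length ≠ list2.length then false
  else pvMatchLoop list1 (list2.map (fun s => PySem.List.sorted s (fun x => x) false))

-- ===== PRECONDITION & SPEC =====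
def Spec_compare_list_of_lists_unordered (list1 : List (List Int)) (list2 : List (List Int)) (out : Bool) : Prop := out = compare_list_of_lists_unordered_alt list1 list2
instance (list1 : List (List Int)) (list2 : List (List Int)) (out : Bool) : Decidable (Spec_compare_list_of_lists_unordered list1 list2 out) := by unfold Spec_compare_list_of_lists_unordered; infer_instance

-- ===== CLAIM (what is proved, stated in full; the proofs are below) =====
def Claim_equal_compare_list_of_lists_unordered : Prop := ∀ (list1 : List (List Int)) (list2 : List (List Int)), Dom_compare_list_of_lists_unordered list1 list2 → Spec_compare_list_of_lists_unordered list1 list2 (compare_list_of_lists_unordered list1 list2)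

-- ===== LEMMAS AND PROOFS =====

-- the hand-written lexicographic LT on List Int and Mathlib's LinearOrder LT are the same instance
theorem pvSortedInst (s : List (List Int)) :
    @PySem.List.sorted (List Int) (List Int) List.instLT (fun a b => a.decidableLT b) s (fun x => x) false =
    @PySem.List.sorted (List Int) (List Int) List.instLinearOrder.toLT LinearOrder.toDecidableLT s (fun x => x) false := by
  congr 1

-- the matching loop decides permutation equivalence of (map sorted l1) with the remaining pool
theorem pvMatchLoop_eq_true_iff (l1 : List (List Int)) (rem : List (List Int)) :
    pvMatchLoop l1 rem = true ↔ (l1.map (fun s => PySem.List.sorted s (fun x => x) false)).Perm rem := by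
  induction l1 generalizing rem with
  | nil =>
    show rem.isEmpty = true ↔ _
    simp only [List.isEmpty_iff, List.map_nil, List.nil_perm]
  | cons sub rest ih =>
    simp only [pvMatchLoop, List.map_cons]
    rcases h : PySem.List.remove? rem (PySem.List.sorted sub (fun x => x) false) with _ | r
    · rw [PySem.List.remove?_eq_none_iff] at h
      simp only [Bool.false_eq_true, false_iff]
      intro hp
      exact h (hp.mem_iff.mp (List.mem_cons_self))
    · have hmem : PySem.List.sorted sub (fun x => x) false ∈ rem := by
        by_contra hc
        rw [← PySem.List.remove?_eq_none_iff rem _] at hc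
        simp [hc] at h
      have := PySem.List.remove?_eq_some_erase rem _ hmem
      rw [this] at h
      injection h with h
      subst h
      rw [ih]
      exact (List.cons_perm_iff_perm_erase.trans (by simp [hmem])).symm

-- ===== VERDICT (by name: the statement is the Claim_ definition above) =====
theorem compare_list_of_lists_unordered_spec : Claim_equal_compare_list_of_lists_unordered := by
  intro list1 list2 _
  unfold Spec_compare_list_of_lists_unordered
  unfold compare_list_of_lists_unordered compare_list_of_lists_unordered_alt
  by_cases hlen : list1.length = list2.length
  · simp only [hlen, ne_eq, not_true_eq_false, if_false]
    rw [Bool.eq_iff_iff, beq_iff_eq, pvMatchLoop_eq_true_iff]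
    rw [pvSortedInst, pvSortedInst]
    exact PySem.List.sorted_id_eq_sorted_id_iff_perm (κ := List Int) _ _
  · simp [hlen]
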